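-- pv_equiv track=rewrite | github.com/VariableV/PasswordGen | backend.py | gen_pw
-- ===== SOURCE A (Python) =====
-- from itertools import zip_longest
-- import string
--
-- symbol_map = "!@#$%^&*()"
--
-- def gen_pw(website):
-- 	website = ''.join(filter(lambda c : c in set(string.ascii_letters), website))
-- 	website = website.lower()
-- 	strlen = len(website)
-- 	# swap letters in groups of two
-- 	swap = ""
-- 	for i in range(0, strlen, 2):
-- 		swap += website[i:i+2][::-1]
-- 	# reverse string
-- 	swap = swap[::-1]
-- 	# get numerical representation of number
-- 	# shift each number by string length
-- 	# multiply by strlen/2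
-- 	nums = []
-- 	for i in range(0, strlen):
-- 		num_rep = ord(swap[i:i+1]) - ord('a')
-- 		shifted = (num_rep + strlen)%26
-- 		shifted *= strlen//2
-- 		nums.append(chr(shifted%26 + ord('a')))
-- 	website = ''.join(nums)
-- 	# capitalize last and first characters
-- 	website = website[0:1].upper() + website[1:strlen-1] + website[strlen-1:].upper()
-- 	# add symbols
-- 	final = ""
-- 	stuff =  strlen//2
-- 	for a,b in zip_longest(website[::2], website[1::2], fillvalue=""):
-- 		if (len(b)==0):
-- 			break
-- 		symbol = symbol_map[ord(b)%9]
-- 		final += a + symbol + b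
-- 	if (strlen % 2 != 0):
-- 		final += website[strlen-1:]
-- 	return final
-- ===== SOURCE B (Python) =====
-- SYMBOLS = "!@#$%^&*()"
--
-- def gen_pw(website):
--     letters = [c for c in website.lower() if 'a' <= c <= 'z']
--     n = len(letters)
--     k = n // 2
--
--     def src(i):
--         # index into `letters` of the i-th character of the block-reversed string:
--         # odd length puts the lone last letter first; then the 2-letter blocks
--         # appear back to front with internal order kept
--         if n % 2 and i == 0:
--             return n - 1
--         t = (i - n % 2) // 2
--         return 2 * (k - 1 - t) + (i - n % 2) % 2
--
--     def tr(i):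
--         # transformed (and, at the ends, capitalized) character at position i,
--         # computed on demand from the source letter via the index map
--         ch = chr((ord(letters[src(i)]) - 97 + n) * k % 26 + 97)
--         return ch.upper() if i == 0 or i == n - 1 else ch
--
--     out = []
--     for j in range(0, n - 1, 2):
--         a, b = tr(j), tr(j + 1)
--         out.append(a + SYMBOLS[ord(b) % 9] + b)
--     if n % 2:
--         out.append(tr(n - 1))
--     return "".join(out)
-- ===== Notes on version B (the rewrite author's own statement) =====
-- stated objective: faster
-- what changed: B drops all of A's intermediate strings (the swapped string, its reversal, the transformed list, the slice-capitalized string and the two stride-2 streams): it derives a closed-form index map src(i) for the block-reversed permutation and computes each output character on demand straight from the filtered letters in a single index loop. (measured ~2.3x faster at the largest timing size by avoiding repeated string concatenation and slicing).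
-- intended difference: On inputs containing exactly one ASCII letter, A's slice-based capitalisation duplicates the transformed character and the odd-length tail append then repeats both, so A returns a five-character password with the letter repeated, while B returns just the single capitalised character, the intended password for a one-letter site name. — e.g. on gen_pw("a"): A returns "A#AAA", B returns "A"
import Mathlib
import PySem

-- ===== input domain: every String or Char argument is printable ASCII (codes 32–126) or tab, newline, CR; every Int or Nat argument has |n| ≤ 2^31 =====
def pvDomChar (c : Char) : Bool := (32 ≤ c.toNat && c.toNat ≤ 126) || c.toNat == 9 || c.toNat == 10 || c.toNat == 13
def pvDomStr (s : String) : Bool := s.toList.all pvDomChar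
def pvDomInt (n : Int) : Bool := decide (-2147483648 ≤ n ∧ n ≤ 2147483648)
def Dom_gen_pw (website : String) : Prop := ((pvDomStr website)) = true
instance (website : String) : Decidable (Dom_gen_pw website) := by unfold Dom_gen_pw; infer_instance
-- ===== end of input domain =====

-- B replaces A's staged pipeline (materialize swapped string, reversed string, transformed
-- list, capitalized string, then interleave) by a closed-form index map: each output character
-- is computed on demand from the filtered letters; a timing run measured B faster (objective: faster).

-- ===== PORT A =====
-- membership in set(string.ascii_letters): exactly the two ASCII letter ranges
def isAsciiLetter (c : Char) : Bool := ('A' ≤ c && c ≤ 'Z') || ('a' ≤ c && c ≤ 'z')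

-- symbol_map[ord(b) % 9]: index is < 9 < 10 = len, always in range, so the default is dead
def symbolMap : List Char := "!@#$%^&*()".toList
def symChar (b : Char) : Char := PySem.List.pyGetD symbolMap (b.toNat % 9) '!'

-- A's loop `for i in range(0, strlen, 2): swap += website[i:i+2][::-1]` as recursion over the
-- same 2-char slices ([::-1] of a ≤2-element slice = .reverse, exact)
def swapLoopA : List Char → List Char
  | [] => []
  | [a] => [a]                                   -- slice [i:i+2] has one char at the end
  | a :: b :: t => [b, a] ++ swapLoopA t         -- website[i:i+2][::-1] = [b, a], then i += 2

-- xs[::2] ported by hand (slice step 2, exact for any list): every other element from index 0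
def stride2 : List Char → List Char
  | [] => []
  | [a] => [a]
  | a :: _ :: t => a :: stride2 t

-- A's zip_longest(website[::2], website[1::2], fillvalue="") loop with `if len(b)==0: break`:
-- stops as soon as the odd stream is exhausted; a = ev[0:1] (empty when ev is exhausted)
def symLoopA : List Char → List Char → List Char
  | _, [] => []
  | ev, b :: ot => ev.take 1 ++ [symChar b, b] ++ symLoopA (ev.drop 1) ot

def gen_pw (website : String) : String :=
  -- ''.join(filter(lambda c: c in set(string.ascii_letters), website)).lower()
  let ls := (website.toList.filter isAsciiLetter).map PySem.Chars.lowerChar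
  let strlen := ls.length
  let swap := (swapLoopA ls).reverse                       -- swap = swap[::-1]
  -- for i in range(0, strlen): nums.append(...)  — one char per index of swap (len swap = strlen)
  let nums := swap.map (fun c =>
    let numRep : Int := (c.toNat : Int) - 97               -- ord(swap[i]) - ord('a')
    let shifted := (numRep + strlen) % 26                  -- Python % with divisor 26 > 0 = Int.emod, exact
    let shifted := shifted * ((strlen / 2 : Nat) : Int)    -- strlen//2 on a nonneg int = Nat division, exact
    Char.ofNat ((shifted % 26 + 97).toNat))                -- chr(shifted%26 + ord('a'))
  -- website[0:1].upper() + website[1:strlen-1] + website[strlen-1:].upper()  (.upper = map upperChar, exact on ASCII)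
  let cap := (PySem.List.slice nums (some 0) (some 1)).map PySem.Chars.upperChar
          ++ PySem.List.slice nums (some 1) (some ((strlen : Int) - 1))
          ++ (PySem.List.slice nums (some ((strlen : Int) - 1)) none).map PySem.Chars.upperChar
  let final := symLoopA (stride2 cap) (stride2 (cap.drop 1))   -- website[::2], website[1::2]
  let final := final ++ (if strlen % 2 ≠ 0 then PySem.List.slice cap (some ((strlen : Int) - 1)) none else [])
  String.ofList final

-- ===== PORT B =====
-- src(i): the closed-form index map; all // and % are on provably nonnegative ints, so Nat
-- division/mod are exact, and Python's k-1-t is never negative (t ≤ k-1) so Nat `-` is exact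
def srcIdx (n k i : Nat) : Nat :=
  if n % 2 = 1 ∧ i = 0 then n - 1
  else 2 * (k - 1 - (i - n % 2) / 2) + (i - n % 2) % 2

-- tr(i): letters[src(i)] is always in range (src(i) < n), so the pyGetD default is dead
def trChar (letters : List Char) (n k i : Nat) : Char :=
  let ch := Char.ofNat (((((PySem.List.pyGetD letters (srcIdx n k i) ' ').toNat : Int) - 97 + n) * k % 26 + 97).toNat)
  if i = 0 ∨ i = n - 1 then PySem.Chars.upperChar ch else ch

-- `for j in range(0, n - 1, 2): out.append(tr(j) + SYMBOLS[ord(tr(j+1)) % 9] + tr(j+1))`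
def outLoopB (letters : List Char) (n k j : Nat) : List Char :=
  if _h : j < n - 1 then
    trChar letters n k j :: symChar (trChar letters n k (j + 1)) :: trChar letters n k (j + 1)
      :: outLoopB letters n k (j + 2)
  else []
termination_by n - j

def gen_pw_alt (website : String) : String :=
  -- [c for c in website.lower() if 'a' <= c <= 'z']
  let letters := (website.toList.map PySem.Chars.lowerChar).filter (fun c => 'a' ≤ c && c ≤ 'z')
  let n := letters.length
  let k := n / 2                                           -- n // 2 on a nonneg int
  let out := outLoopB letters n k 0
  String.ofList (out ++ (if n % 2 = 1 then [trChar letters n k (n - 1)] else []))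

-- ===== PRECONDITION & SPEC =====
-- On inputs containing exactly one ASCII letter, A's slice-based capitalisation duplicates the
-- character and the odd-length tail append repeats both, so A returns a 5-character string
-- (e.g. "A#AAA") while B returns the single capitalised character ("A"), the intended password.
def D_gen_pw (website : String) : Prop := website.toList.countP Char.isAlpha = 1
instance (website : String) : Decidable (D_gen_pw website) := by unfold D_gen_pw; infer_instance

def Spec_gen_pw (website : String) (out : String) : Prop := ¬ D_gen_pw website → out = gen_pw_alt website
instance (website : String) (out : String) : Decidable (Spec_gen_pw website out) := by unfold Spec_gen_pw; infer_instance

def pvDiffWitness_gen_pw : String := "a"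
def pvDiffWitnessOut_gen_pw : String × String := ("A#AAA", "A")

-- ===== CLAIM (what is proved, stated in full; the proofs are below) =====
def Claim_unchanged_gen_pw : Prop := ∀ (website : String), Dom_gen_pw website → Spec_gen_pw website (gen_pw website)
def Claim_changed_gen_pw : Prop := Dom_gen_pw (pvDiffWitness_gen_pw) ∧ D_gen_pw (pvDiffWitness_gen_pw) ∧ gen_pw (pvDiffWitness_gen_pw) = pvDiffWitnessOut_gen_pw.1 ∧ gen_pw_alt (pvDiffWitness_gen_pw) = pvDiffWitnessOut_gen_pw.2 ∧ pvDiffWitnessOut_gen_pw.1 ≠ pvDiffWitnessOut_gen_pw.2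
def Claim_exact_gen_pw : Prop := ∀ (website : String), Dom_gen_pw website → D_gen_pw website → gen_pw website ≠ gen_pw_alt website

-- ===== LEMMAS AND PROOFS =====

-- proof-side bridges: A's 2-char blocks, Python-style first/last capitalisation, and the
-- common pair-recursive form of the symbol-interleaving phase
def toBlocks : List Char → List (List Char)
  | [] => []
  | [a] => [[a]]
  | a :: b :: t => [a, b] :: toBlocks t

def capFirstLast (l : List Char) : List Char :=
  if l.isEmpty then l
  else
    let l1 := l.set 0 (PySem.Chars.upperChar (l.headD ' '))
    l1.dropLast ++ [PySem.Chars.upperChar (l1.getLastD ' ')]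

def symRec : List Char → List Char
  | a :: b :: t => a :: symChar b :: b :: symRec t
  | _ => []

theorem alpha_eq (c : Char) : c.isAlpha = isAsciiLetter c := by
  simp only [Char.isAlpha, Char.isUpper, Char.isLower, isAsciiLetter, Char.le_def]
  rw [Bool.eq_iff_iff]
  simp [ge_iff_le]

theorem countP_alpha_eq (l : List Char) :
    l.countP Char.isAlpha = (l.filter isAsciiLetter).length := by
  rw [List.countP_eq_length_filter]
  congr 1
  exact List.filter_congr (fun c _ => alpha_eq c)

-- B's filter-after-lower selects the same letters as A's filter-then-lower
theorem char_le_iff (c d : Char) : c ≤ d ↔ c.toNat ≤ d.toNat := by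
  rw [Char.le_def, UInt32.le_iff_toNat_le]; exact Iff.rfl

-- B's filter-after-lower selects the same letters as A's filter-then-lower
theorem lower_filter_eq (c : Char) :
    ('a' ≤ PySem.Chars.lowerChar c && PySem.Chars.lowerChar c ≤ 'z') = isAsciiLetter c := by
  rw [Bool.eq_iff_iff]
  simp only [PySem.Chars.lowerChar, PySem.Chars.isupper, isAsciiLetter, Bool.and_eq_true,
    Bool.or_eq_true, decide_eq_true_eq]
  by_cases h : 'A' ≤ c ∧ c ≤ 'Z'
  · have hc : 65 ≤ c.toNat ∧ c.toNat ≤ 90 :=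
      ⟨(char_le_iff _ _).mp h.1, (char_le_iff _ _).mp h.2⟩
    rw [if_pos (by simp [h.1, h.2])]
    have hof : (Char.ofNat (c.toNat + 32)).toNat = c.toNat + 32 := by
      rw [Char.toNat_ofNat, if_pos (Or.inl (by omega))]
    simp only [char_le_iff, hof]
    simp only [show ('a').toNat = 97 from rfl, show ('z').toNat = 122 from rfl,
      show ('A').toNat = 65 from rfl, show ('Z').toNat = 90 from rfl]
    omega
  · rw [if_neg (by simpa using h)]
    have h' : ¬(65 ≤ c.toNat ∧ c.toNat ≤ 90) := fun hh =>
      h ⟨(char_le_iff _ _).mpr hh.1, (char_le_iff _ _).mpr hh.2⟩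
    simp only [char_le_iff]
    simp only [show ('a').toNat = 97 from rfl, show ('z').toNat = 122 from rfl,
      show ('A').toNat = 65 from rfl, show ('Z').toNat = 90 from rfl]
    omega

theorem letters_eq (l : List Char) :
    (l.map PySem.Chars.lowerChar).filter (fun c => 'a' ≤ c && c ≤ 'z')
      = (l.filter isAsciiLetter).map PySem.Chars.lowerChar := by
  rw [List.filter_map]
  congr 1
  exact List.filter_congr (fun c _ => lower_filter_eq c)

theorem rev_swapLoopA (l : List Char) : (swapLoopA l).reverse = (toBlocks l).reverse.flatten := by
  induction l using swapLoopA.induct <;> simp [swapLoopA, toBlocks, *]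

theorem int_mod_mul (x k : Int) : x % 26 * k % 26 = x * k % 26 := by
  conv_lhs => rw [Int.mul_emod]
  conv_rhs => rw [Int.mul_emod]
  rw [Int.emod_emod_of_dvd _ dvd_rfl]

theorem drop_length_sub_one {α : Type} (d : α) (l : List α) (h : l ≠ []) :
    l.drop (l.length - 1) = [l.getLastD d] := by
  induction l with
  | nil => simp at h
  | cons a t ih =>
    cases t with
    | nil => simp
    | cons b t2 => simpa using ih (by simp)

theorem length_toBlocksFlat (l : List Char) : ((toBlocks l).reverse.flatten).length = l.length := by
  induction l using toBlocks.induct <;> simp [toBlocks, *]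

theorem length_capFirstLast (l : List Char) : (capFirstLast l).length = l.length := by
  cases l with
  | nil => simp [capFirstLast]
  | cons a t => simp [capFirstLast]

theorem cap_eq (p : List Char) (h : p.length ≠ 1) :
    (PySem.List.slice p (some 0) (some 1)).map PySem.Chars.upperChar
      ++ PySem.List.slice p (some 1) (some ((p.length : Int) - 1))
      ++ (PySem.List.slice p (some ((p.length : Int) - 1)) none).map PySem.Chars.upperChar
    = capFirstLast p := by
  cases p with
  | nil => simp [capFirstLast, PySem.List.slice]
  | cons a rest =>
    cases rest with
    | nil => simp at h
    | cons b t =>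
      have h1 : ((a :: b :: t).length : Int) - 1 = (((b :: t).length : Nat) : Int) := by
        simp only [List.length_cons]; push_cast; ring
      rw [h1, PySem.List.slice_from_natCast]
      have h2 : PySem.List.slice (a :: b :: t) (some 0) (some 1) = [a] := by
        rw [PySem.List.slice_zero_start, show ((1:Int)) = ((1:Nat):Int) from rfl,
          PySem.List.slice_to_natCast]
        rfl
      have h3 : PySem.List.slice (a :: b :: t) (some 1) (some (((b :: t).length : Nat) : Int))
          = (b :: t).dropLast := by
        rw [show ((1:Int)) = ((1:Nat):Int) from rfl, PySem.List.slice_natCast]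
        simp [List.dropLast_eq_take]
      rw [h2, h3]
      have h4 : (a :: b :: t).drop ((b :: t).length) = [(a :: b :: t).getLastD ' '] := by
        simpa using drop_length_sub_one ' ' (a :: b :: t) (by simp)
      rw [h4]
      simp only [capFirstLast, List.isEmpty_cons, Bool.false_eq_true, if_false, List.headD_cons,
        List.set_cons_zero]
      simp [List.dropLast_cons₂]

theorem symLoopA_eq (m : List Char) : symLoopA (stride2 m) (stride2 (m.drop 1)) = symRec m := by
  induction m using stride2.induct with
  | case1 => simp [stride2, symLoopA, symRec]
  | case2 a => simp [stride2, symLoopA, symRec]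
  | case3 a b t ih =>
    have hb : stride2 (b :: t) = b :: stride2 (t.drop 1) := by
      cases t <;> simp [stride2]
    rw [List.drop_succ_cons, List.drop_zero, hb]
    simp only [stride2, symLoopA, symRec, List.take, List.drop]
    rw [List.drop_one] at ih
    simp [ih]

-- ------- B-side lemmas: the index map is the blocks-reversed permutation -------

theorem srcIdx_lt (n k i : Nat) (hk : k = n / 2) (hi : i < n) : srcIdx n k i < n := by
  unfold srcIdx; split <;> omega

theorem srcIdx_shift (n k i : Nat) (hk : k = n / 2) (h2 : 2 ≤ n) (hi : i < n - 2) :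
    srcIdx n k i = srcIdx (n - 2) (k - 1) i + 2 := by
  unfold srcIdx; split <;> split <;> omega

theorem srcIdx_last2 (n k : Nat) (hk : k = n / 2) (h2 : 2 ≤ n) :
    srcIdx n k (n - 2) = 0 ∧ srcIdx n k (n - 1) = 1 := by
  unfold srcIdx
  constructor <;> split <;> omega

theorem getD_dropLast {α : Type} (l : List α) (i : Nat) (d : α) (h : i < l.length - 1) :
    l.dropLast.getD i d = l.getD i d := by
  rw [List.getD_eq_getElem?_getD, List.getD_eq_getElem?_getD, List.getElem?_dropLast, if_pos h]

theorem getD_last {α : Type} (d : α) (l : List α) (h : l ≠ []) :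
    l.getD (l.length - 1) d = l.getLastD d := by
  rw [List.getD_eq_getElem l d (by cases l with | nil => simp at h | cons a t => simp),
    List.getLastD_eq_getLast?, List.getLast?_eq_getLast_of_ne_nil h, List.getLast_eq_getElem]
  simp

theorem reorder_getD (l : List Char) (i : Nat) (hi : i < l.length) :
    ((toBlocks l).reverse.flatten).getD i ' ' = l.getD (srcIdx l.length (l.length / 2) i) ' ' := by
  induction l using toBlocks.induct generalizing i with
  | case1 => simp at hi
  | case2 a =>
    have : i = 0 := by simpa using hi
    subst this
    simp [toBlocks, srcIdx]
  | case3 a b t ih =>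
    have hflat : (toBlocks (a :: b :: t)).reverse.flatten
        = (toBlocks t).reverse.flatten ++ [a, b] := by simp [toBlocks]
    have hlt : ((toBlocks t).reverse.flatten).length = t.length := length_toBlocksFlat t
    simp only [List.length_cons] at hi ⊢
    rcases Nat.lt_trichotomy i t.length with h | h | h
    · have hsh : srcIdx (t.length + 1 + 1) ((t.length + 1 + 1) / 2) i
          = srcIdx t.length (t.length / 2) i + 2 := by
        have := srcIdx_shift (t.length + 1 + 1) ((t.length + 1 + 1) / 2) i rfl (by omega)
          (by omega)
        rw [this, show t.length + 1 + 1 - 2 = t.length by omega,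
          show (t.length + 1 + 1) / 2 - 1 = t.length / 2 by omega]
      rw [hflat, List.getD_append _ _ _ _ (by omega), hsh, ih i h]
      simp
    · subst h
      have h0 := (srcIdx_last2 (t.length + 1 + 1) ((t.length + 1 + 1) / 2) rfl (by omega)).1
      rw [show t.length + 1 + 1 - 2 = t.length by omega] at h0
      rw [hflat, List.getD_append_right _ _ _ _ (by omega), h0, hlt]
      simp
    · have h1 : i = t.length + 1 := by omega
      subst h1
      have h0 := (srcIdx_last2 (t.length + 1 + 1) ((t.length + 1 + 1) / 2) rfl (by omega)).2
      rw [show t.length + 1 + 1 - 1 = t.length + 1 by omega] at h0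
      rw [hflat, List.getD_append_right _ _ _ _ (by omega), h0, hlt]
      simp

theorem cap_getD (p : List Char) (h2 : 2 ≤ p.length) (i : Nat) (hi : i < p.length) :
    (capFirstLast p).getD i ' ' = if i = 0 ∨ i = p.length - 1
      then PySem.Chars.upperChar (p.getD i ' ') else p.getD i ' ' := by
  rcases p with _ | ⟨a, _ | ⟨b, t⟩⟩
  · simp at h2
  · simp at h2
  · simp only [capFirstLast, List.isEmpty_cons, Bool.false_eq_true, if_false, List.headD_cons,
      List.set_cons_zero]
    simp only [List.length_cons] at hi ⊢
    by_cases h : i < t.length + 1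
    · rw [List.getD_append _ _ _ _ (by simpa using h), getD_dropLast _ _ _ (by simpa using h)]
      by_cases h0 : i = 0
      · subst h0; simp
      · rw [if_neg (by omega)]
        obtain ⟨j, rfl⟩ := Nat.exists_eq_add_of_lt (Nat.pos_of_ne_zero h0)
        simp
    · have hlast : i = t.length + 1 := by omega
      subst hlast
      rw [List.getD_append_right _ _ _ _ (by simp)]
      have hcnd : t.length + 1 = 0 ∨ t.length + 1 = t.length + 1 + 1 - 1 := by omega
      rw [if_pos hcnd]
      simp only [List.length_dropLast, List.length_cons]
      rw [show t.length + 1 + 1 - 1 = t.length + 1 from rfl]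
      simp only [Nat.sub_self, List.getD_cons_zero]
      congr 1
      rw [List.getD_cons_succ]
      have hgl := getD_last ' ' (b :: t) (by simp)
      simp only [List.length_cons, Nat.add_sub_cancel] at hgl
      rw [hgl, List.getLastD_cons, List.getLastD_cons, List.getLastD_cons]

theorem outLoopB_stop (letters : List Char) (n k j : Nat) (h : ¬ j < n - 1) :
    outLoopB letters n k j = [] := by
  rw [outLoopB]; simp [h]

theorem outLoopB_eq_aux (letters m : List Char) (n k : Nat) (hn : m.length = n)
    (htr : ∀ i, i < n → m.getD i ' ' = trChar letters n k i) :
    ∀ K j, n - j ≤ K → outLoopB letters n k j = symRec (m.drop j) := by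
  intro K
  induction K with
  | zero =>
    intro j hj
    rw [outLoopB_stop _ _ _ _ (by omega)]
    have : m.drop j = [] ∨ ∃ x, m.drop j = [x] := by
      rcases Nat.lt_or_ge j m.length with h1 | h1
      · right
        exact List.length_eq_one_iff.mp (by simp; omega)
      · left; exact List.drop_eq_nil_of_le h1
    rcases this with h | ⟨x, h⟩ <;> simp [h, symRec]
  | succ K ih =>
    intro j hj
    by_cases h : j < n - 1
    · rw [outLoopB]
      rw [dif_pos h]
      have h1 : j < m.length := by omega
      have h2 : j + 1 < m.length := by omega
      have hd : m.drop j = m.getD j ' ' :: m.getD (j + 1) ' ' :: m.drop (j + 2) := by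
        rw [List.drop_eq_getElem_cons h1, List.drop_eq_getElem_cons h2,
          List.getD_eq_getElem m ' ' h1, List.getD_eq_getElem m ' ' h2]
      rw [ih (j+2) (by omega), hd, symRec, htr j (by omega), htr (j+1) (by omega)]
    · rw [outLoopB_stop _ _ _ _ h]
      have : m.drop j = [] ∨ ∃ x, m.drop j = [x] := by
        rcases Nat.lt_or_ge j m.length with h1 | h1
        · right
          exact List.length_eq_one_iff.mp (by simp; omega)
        · left; exact List.drop_eq_nil_of_le h1
      rcases this with h | ⟨x, h⟩ <;> simp [h, symRec]

-- ===== VERDICT (by name: the statement is the Claim_ definition above) =====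
theorem gen_pw_spec : Claim_unchanged_gen_pw := by
  intro website _ hD
  show gen_pw website = gen_pw_alt website
  have hL : ((website.toList.filter isAsciiLetter).map PySem.Chars.lowerChar).length ≠ 1 := by
    intro hcon
    apply hD
    unfold D_gen_pw
    rw [countP_alpha_eq]
    simpa using hcon
  simp only [gen_pw, gen_pw_alt, letters_eq]
  set l := (website.toList.filter isAsciiLetter).map PySem.Chars.lowerChar with hl
  rw [rev_swapLoopA]
  have hfun : (fun c : Char => Char.ofNat
        ((((c.toNat : Int) - 97 + l.length) % 26 * (l.length / 2 : Nat)) % 26 + 97).toNat)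
      = (fun c : Char => Char.ofNat
        (((((c.toNat : Int) - 97 + l.length) * (l.length / 2 : Nat)) % 26 + 97).toNat)) :=
    funext fun c => by rw [int_mod_mul]
  rw [hfun]
  set p := ((toBlocks l).reverse.flatten).map (fun c : Char => Char.ofNat
    (((((c.toNat : Int) - 97 + l.length) * (l.length / 2 : Nat)) % 26 + 97).toNat)) with hp
  have hpl : p.length = l.length := by rw [hp, List.length_map, length_toBlocksFlat]
  have hc := cap_eq p (by rw [hpl]; exact hL)
  rw [hpl] at hc
  rw [hc]
  rw [symLoopA_eq]
  have hcl : (capFirstLast p).length = l.length := by rw [length_capFirstLast, hpl]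
  -- pointwise: B's on-demand character = A's materialized capitalized character
  have htr : ∀ i, i < l.length →
      (capFirstLast p).getD i ' ' = trChar l l.length (l.length / 2) i := by
    intro i hi
    have h2 : 2 ≤ l.length := by omega
    have hsrc := srcIdx_lt l.length (l.length / 2) i rfl hi
    have hg : PySem.List.pyGetD l ((srcIdx l.length (l.length / 2) i : Nat) : Int) ' '
        = l.getD (srcIdx l.length (l.length / 2) i) ' ' := PySem.List.pyGetD_natCast ..
    have hr : ((toBlocks l).reverse.flatten)[i]?
        = some (((toBlocks l).reverse.flatten)[i]'(by rw [length_toBlocksFlat]; omega)) :=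
      List.getElem?_eq_getElem _
    have hp_i : p.getD i ' ' = (fun c : Char => Char.ofNat
        (((((c.toNat : Int) - 97 + l.length) * (l.length / 2 : Nat)) % 26 + 97).toNat))
        (((toBlocks l).reverse.flatten).getD i ' ') := by
      simp only [List.getD_eq_getElem?_getD, hp, List.getElem?_map, hr, Option.map_some,
        Option.getD_some]
    rw [cap_getD p (by omega) i (by omega), hp_i, reorder_getD l i hi]
    unfold trChar
    rw [hg, hpl]
  have hB : outLoopB l l.length (l.length / 2) 0 = symRec (capFirstLast p) := by
    rw [outLoopB_eq_aux l (capFirstLast p) l.length (l.length / 2) hcl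
      (fun i hi => htr i hi) l.length 0 (by omega)]
    simp
  rw [hB]
  by_cases hodd : l.length % 2 = 1
  · rw [if_pos (by omega), if_pos hodd]
    have hne : capFirstLast p ≠ [] := by
      intro hnil
      rw [hnil] at hcl
      simp at hcl
      omega
    have h1 : ((l.length : Int) - 1) = (((l.length - 1 : Nat)) : Int) := by
      have : 1 ≤ l.length := by omega
      push_cast [this]
      ring
    rw [h1, PySem.List.slice_from_natCast]
    have hne' : capFirstLast p ≠ [] := hne
    have hdrop : (capFirstLast p).drop (l.length - 1) = [(capFirstLast p).getLastD ' '] := by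
      rw [show l.length - 1 = (capFirstLast p).length - 1 by rw [hcl]]
      exact drop_length_sub_one ' ' _ hne
    rw [hdrop]
    have hlast : trChar l l.length (l.length / 2) (l.length - 1)
        = (capFirstLast p).getLastD ' ' := by
      rw [← htr (l.length - 1) (by omega),
        show l.length - 1 = (capFirstLast p).length - 1 by rw [hcl]]
      exact getD_last ' ' _ hne
    rw [hlast]
  · rw [if_neg (by omega), if_neg hodd]

theorem gen_pw_changed : Claim_changed_gen_pw := by
  unfold Claim_changed_gen_pw
  refine ⟨by decide, by decide, by decide, ?_, by decide⟩
  show gen_pw_alt "a" = "A"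
  simp only [gen_pw_alt, show ((("a".toList.map PySem.Chars.lowerChar).filter
    (fun c => 'a' ≤ c && c ≤ 'z'))) = ['a'] from by decide]
  rw [outLoopB_stop _ _ _ _ (by simp)]
  norm_num [trChar, srcIdx]
  decide

theorem gen_pw_tight : Claim_exact_gen_pw := by
  intro website _ hD
  have hl1 : ((website.toList.filter isAsciiLetter).map PySem.Chars.lowerChar).length = 1 := by
    unfold D_gen_pw at hD
    rw [countP_alpha_eq] at hD
    simpa using hD
  obtain ⟨c, hc⟩ := List.length_eq_one_iff.mp hl1
  intro heq
  have hlen := congrArg (fun s => s.toList.length) heq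
  simp only [gen_pw, gen_pw_alt, letters_eq, hc] at hlen
  rw [outLoopB_stop _ _ _ _ (by simp)] at hlen
  simp [swapLoopA, stride2, symLoopA, symChar,
    PySem.List.slice, PySem.List.clampIdx] at hlen
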